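-- pv_equiv track=rewrite | github.com/Rednas1992/.XLSX-naar-.TXT-Convertor | py/script.py | jsonToCSV
-- ===== SOURCE A (Python) =====
-- def jsonToCSV(json_data):
--     headers = list(json_data[0].keys())
--     csv_rows = [headers]
--
--     count = 0
--     max_rows = 499
--     data_list = []
--
--     for row in json_data:
--         values = [row.get(header) for header in headers]
--         if count == max_rows:
--             count = 0
--             data_list.append("\n".join([",".join(row) for row in csv_rows]))
--             csv_rows = [headers]
--
--         csv_rows.append(values)
--         count += 1
--
--     data_list.append("\n".join([",".join(row) for row in csv_rows]))
--     return data_list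
-- ===== SOURCE B (Python) =====
-- def jsonToCSV(json_data):
--     headers = list(json_data[0].keys())
--     data_list = []
--     rest = json_data
--     while rest:
--         block, rest = rest[:499], rest[499:]
--         csv_rows = [headers] + [[row.get(header) for header in headers] for row in block]
--         data_list.append("\n".join([",".join(row) for row in csv_rows]))
--     return data_list
-- ===== Notes on version B (the rewrite author's own statement) =====
-- stated objective: simpler
-- what changed: Replaces the counter-based inline flush (mutable count/csv_rows/data_list threaded through one loop) with slicing off 499-row blocks from the front and rendering each block independently.
import Mathlib
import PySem

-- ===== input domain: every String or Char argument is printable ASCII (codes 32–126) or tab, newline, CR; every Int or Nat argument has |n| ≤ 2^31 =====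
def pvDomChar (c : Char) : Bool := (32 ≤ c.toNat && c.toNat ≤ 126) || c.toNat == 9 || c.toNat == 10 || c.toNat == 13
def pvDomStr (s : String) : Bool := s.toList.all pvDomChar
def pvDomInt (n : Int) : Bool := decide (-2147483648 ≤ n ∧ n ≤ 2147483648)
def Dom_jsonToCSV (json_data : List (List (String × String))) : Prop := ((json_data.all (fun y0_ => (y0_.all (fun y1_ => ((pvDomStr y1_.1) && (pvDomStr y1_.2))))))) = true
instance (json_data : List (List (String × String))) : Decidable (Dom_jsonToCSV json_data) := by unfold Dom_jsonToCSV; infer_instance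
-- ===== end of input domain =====

-- B replaces A's counter-based inline flush with slicing 499-row blocks off the front; objective: simpler.

-- shared helpers: the row comprehension [row.get(h) for h in headers] and "\n".join(",".join(r) for r in rows)
-- (identical expressions in both Pythons)
def pvVals (headers : List String) (row : List (String × String)) : List String :=
  headers.map (fun h => PySem.Dict.getD (PySem.Dict.mk row) h "")

def pvJoinRows (csv_rows : List (List String)) : String :=
  PySem.Str.join "\n" (csv_rows.map (fun row => PySem.Str.join "," row))

-- ===== PORT A =====
-- the loop body of A: flush csv_rows into data_list when count == 499, then append values
def pvStepA (headers : List String) (st : List (List String) × Int × List String)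
    (row : List (String × String)) : List (List String) × Int × List String :=
  -- row.get(header) returns None on a missing header and ",".join then raises TypeError; Pre_ excludes that, so getD "" is exact
  let values := pvVals headers row
  if st.2.1 == 499 then
    ([headers, values], 1, st.2.2 ++ [pvJoinRows st.1])
  else
    (st.1 ++ [values], st.2.1 + 1, st.2.2)

def jsonToCSV (json_data : List (List (String × String))) : List String :=
  -- json_data[0].keys(): Pre_ excludes the empty list, where Python raises IndexError
  let headers := (PySem.Dict.mk (json_data.headD [])).keys
  let s := json_data.foldl (pvStepA headers) ([headers], 0, [])
  s.2.2 ++ [pvJoinRows s.1]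

-- ===== PORT B =====
-- rest[499:] and rest[:499] (cited by pvAltGo's termination proof and by the lemmas below)
theorem pvSliceFrom499 {α : Type} (xs : List α) :
    PySem.List.slice xs (some 499) none = xs.drop 499 := by
  rw [PySem.List.slice_from xs (by norm_num)]; rfl

-- the while-loop of Source B: slice off block = rest[:499], recurse on rest[499:] until rest is empty
def pvAltGo (headers : List String) (rest : List (List (String × String))) : List String :=
  if _h : rest = [] then []
  else
    let block := PySem.List.slice rest none (some 499)
    let rest' := PySem.List.slice rest (some 499) none
    pvJoinRows (headers :: block.map (pvVals headers)) :: pvAltGo headers rest'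
termination_by rest.length
decreasing_by
  rw [pvSliceFrom499]
  have := List.length_pos_iff.mpr _h
  simp [List.length_drop]
  omega

def jsonToCSV_alt (json_data : List (List (String × String))) : List String :=
  -- json_data[0].keys(): Pre_ excludes the empty list, where Python raises IndexError
  let headers := (PySem.Dict.mk (json_data.headD [])).keys
  pvAltGo headers json_data

-- ===== PRECONDITION & SPEC =====
-- Pre_ excludes exactly the inputs where Python A raises: the empty list (IndexError on json_data[0])
-- and inputs where some row lacks one of the first row's keys (row.get gives None, ",".join raises TypeError).
def Pre_jsonToCSV (json_data : List (List (String × String))) : Prop :=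
  json_data ≠ [] ∧
  ∀ row ∈ json_data, ∀ h ∈ (PySem.Dict.mk (json_data.headD [])).keys,
    (PySem.Dict.mk row).contains h = true
instance (json_data : List (List (String × String))) : Decidable (Pre_jsonToCSV json_data) := by
  unfold Pre_jsonToCSV; infer_instance

def pvWitness_jsonToCSV : (List (List (String × String))) := [[("a", "1"), ("b", "2")], [("b", "4"), ("a", "3")]]

def Spec_jsonToCSV (json_data : List (List (String × String))) (out : List String) : Prop := out = jsonToCSV_alt json_data
instance (json_data : List (List (String × String))) (out : List String) : Decidable (Spec_jsonToCSV json_data out) := by unfold Spec_jsonToCSV; infer_instance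

-- ===== CLAIM (what is proved, stated in full; the proofs are below) =====
def Claim_equal_jsonToCSV : Prop := ∀ (json_data : List (List (String × String))), Dom_jsonToCSV json_data → Pre_jsonToCSV json_data → Spec_jsonToCSV json_data (jsonToCSV json_data)

-- ===== LEMMAS AND PROOFS =====

-- rest[:499]
theorem pvSliceTo499 {α : Type} (xs : List α) :
    PySem.List.slice xs none (some 499) = xs.take 499 := by
  rw [PySem.List.slice_to xs (by norm_num)]; rfl

-- chunks of 499 data rows, never empty: the common shape both ports are reduced to
def pvChunkNE {α : Type} (xs : List α) : List (List α) :=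
  if xs.length ≤ 499 then [xs] else xs.take 499 :: pvChunkNE (xs.drop 499)
termination_by xs.length
decreasing_by simp; omega

theorem pvChunkNE_le {α : Type} (xs : List α) (h : xs.length ≤ 499) : pvChunkNE xs = [xs] := by
  rw [pvChunkNE]; simp [h]

theorem pvChunkNE_gt {α : Type} (xs : List α) (h : ¬ xs.length ≤ 499) :
    pvChunkNE xs = xs.take 499 :: pvChunkNE (xs.drop 499) := by
  rw [pvChunkNE]; simp [h]

theorem pvChunkNE_map {α β : Type} (f : α → β) (xs : List α) :
    pvChunkNE (xs.map f) = (pvChunkNE xs).map (List.map f) := by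
  induction xs using pvChunkNE.induct with
  | case1 xs h =>
    rw [pvChunkNE_le _ h, pvChunkNE_le _ (by simpa using h), List.map_cons, List.map_nil]
  | case2 xs h ih =>
    rw [pvChunkNE_gt _ h, pvChunkNE_gt _ (by simpa using h), List.map_cons,
        List.map_take, ← List.map_drop, ih]

theorem pvAltGo_eq (headers : List String) (xs : List (List (String × String))) (hne : xs ≠ []) :
    pvAltGo headers xs
      = (pvChunkNE xs).map (fun b => pvJoinRows (headers :: b.map (pvVals headers))) := by
  induction xs using pvChunkNE.induct with
  | case1 xs h =>
    have hdrop : xs.drop 499 = [] := List.drop_eq_nil_of_le h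
    rw [pvAltGo, dif_neg hne]
    simp only [pvSliceFrom499, pvSliceTo499, hdrop]
    rw [pvAltGo, dif_pos rfl, pvChunkNE_le _ h, List.take_of_length_le h,
        List.map_cons, List.map_nil]
  | case2 xs h ih =>
    have hdne : xs.drop 499 ≠ [] := by
      intro hc; exact h (List.drop_eq_nil_iff.mp hc)
    rw [pvAltGo, dif_neg hne]
    simp only [pvSliceFrom499, pvSliceTo499]
    rw [pvChunkNE_gt _ h, ih hdne, List.map_cons]

theorem loopA_eq (headers : List String) :
    ∀ (xs : List (List (String × String))) (pre : List (List String)) (acc : List String),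
      pre.length ≤ 499 →
      (xs.foldl (pvStepA headers) (headers :: pre, (pre.length : Int), acc)).2.2
        ++ [pvJoinRows (xs.foldl (pvStepA headers) (headers :: pre, (pre.length : Int), acc)).1]
      = acc ++ (pvChunkNE (pre ++ xs.map (pvVals headers))).map (fun c => pvJoinRows (headers :: c)) := by
  intro xs
  induction xs with
  | nil =>
    intro pre acc hle
    rw [List.foldl_nil, List.map_nil, List.append_nil, pvChunkNE_le _ hle]
    simp
  | cons r rest ih =>
    intro pre acc hle
    rw [List.foldl_cons]
    by_cases hp : pre.length = 499
    · have hstep : pvStepA headers (headers :: pre, (pre.length : Int), acc) r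
          = (headers :: [pvVals headers r], 1, acc ++ [pvJoinRows (headers :: pre)]) := by
        simp [pvStepA, hp]
      have H := ih [pvVals headers r] (acc ++ [pvJoinRows (headers :: pre)]) (by simp)
      simp only [List.length_cons, List.length_nil, Nat.cast_one, zero_add] at H
      rw [hstep, H, List.map_cons]
      have hlen : ¬ (pre ++ pvVals headers r :: rest.map (pvVals headers)).length ≤ 499 := by
        simp [hp]
      rw [pvChunkNE_gt _ hlen, List.take_left' hp, List.drop_left' hp]
      simp only [List.singleton_append, List.map_cons, List.append_assoc]
    · have hbeq : ((pre.length : Int) == 499) = false := by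
        simp; omega
      have hstep : pvStepA headers (headers :: pre, (pre.length : Int), acc) r
          = (headers :: (pre ++ [pvVals headers r]), (((pre ++ [pvVals headers r]).length : Nat) : Int), acc) := by
        simp [pvStepA, hbeq]
      have H := ih (pre ++ [pvVals headers r]) acc (by simp; omega)
      rw [hstep, H, List.map_cons]
      simp only [List.append_assoc, List.singleton_append]

-- ===== VERDICT (by name: the statement is the Claim_ definition above) =====
theorem jsonToCSV_spec : Claim_equal_jsonToCSV := by
  intro json_data _ hpre
  obtain ⟨hne, -⟩ := hpre
  unfold Spec_jsonToCSV jsonToCSV jsonToCSV_alt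
  have H := loopA_eq ((PySem.Dict.mk (json_data.headD [])).keys) json_data [] [] (by simp)
  simp only [List.length_nil, Nat.cast_zero, List.nil_append] at H
  simp only []
  rw [H, pvAltGo_eq _ _ hne, pvChunkNE_map, List.map_map]
  simp [Function.comp]
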